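-- pv_equiv track=rewrite | github.com/tala-it3/code | main.py | winner_of_race
-- ===== SOURCE A (Python) =====
-- def winner_of_race(runner_id, time_taken):
--     """
--     Determines the winner of a race based on the shortest time taken, ignoring times of 0.
--
--     Parameters:
--     ----------
--     id : list
--         A list of participant IDs.
--     time_taken : list
--         A list of finish times.
--
--     Returns:
--     -------
--     str
--         The ID with the shortest completion time, excluding any times of 0.
--     """
--     # Create lists of id's and finish times, excluding times of zero
--     valid_ids = []
--     valid_times = []
--
--     for i in range(len(time_taken)):
--         if time_taken[i] > 0:
--             valid_ids.append(runner_id[i])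
--             valid_times.append(time_taken[i])
--
--     # If no participants, return an empty string
--     if not valid_ids:
--         return ""
--
--     # Find the index of the smallest time in valid_times
--     min_time_index = valid_times.index(min(valid_times))
--
--     # Return the ID of the smallest time
--     return valid_ids[min_time_index]
-- ===== SOURCE B (Python) =====
-- def winner_of_race(runner_id, time_taken):
--     best = None  # (id, time) of the earliest strictly-smallest positive time so far
--     for rid, t in zip(runner_id, time_taken):
--         if t > 0 and (best is None or t < best[1]):
--             best = (rid, t)
--     return "" if best is None else best[0]
-- ===== Notes on version B (the rewrite author's own statement) =====
-- stated objective: simpler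
-- what changed: Replaces A's four passes (index loop building two parallel filtered lists, then min(), then .index(), then a final lookup) by one fold over zip(runner_id, time_taken) keeping a single (id, time) best pair, strict < so ties keep the earliest.
import Mathlib
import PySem

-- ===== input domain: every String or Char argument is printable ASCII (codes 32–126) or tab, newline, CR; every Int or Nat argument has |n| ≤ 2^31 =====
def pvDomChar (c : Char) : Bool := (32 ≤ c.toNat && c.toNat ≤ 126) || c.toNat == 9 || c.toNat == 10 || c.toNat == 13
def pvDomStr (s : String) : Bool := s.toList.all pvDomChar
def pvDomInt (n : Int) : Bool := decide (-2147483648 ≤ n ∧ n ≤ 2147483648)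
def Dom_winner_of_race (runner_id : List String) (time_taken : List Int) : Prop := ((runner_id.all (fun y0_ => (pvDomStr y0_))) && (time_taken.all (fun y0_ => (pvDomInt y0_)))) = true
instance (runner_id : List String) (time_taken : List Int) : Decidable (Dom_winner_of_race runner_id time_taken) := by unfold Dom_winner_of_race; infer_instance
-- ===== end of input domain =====

-- B fuses A's four passes into one fold over the zipped pairs keeping the best (id, time); equivalence is about the return value (A mutates nothing).

-- ===== PORT A =====
-- literal port of A: index loop building two filtered lists, then min, then index, then lookup.
-- pyGetD is used for the Python indexing; under Pre_ every executed access is in range, so the default is never produced.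
def winner_of_race (runner_id : List String) (time_taken : List Int) : String :=
  let acc := (PySem.List.pyRange 0 time_taken.length 1).foldl
    (fun (acc : List String × List Int) i =>
      if 0 < PySem.List.pyGetD time_taken i 0 then
        (acc.1 ++ [PySem.List.pyGetD runner_id i ""], acc.2 ++ [PySem.List.pyGetD time_taken i 0])
      else acc) ([], [])
  if acc.1 = [] then ""
  else
    match PySem.List.min? acc.2 (fun x => x) with
    | none => ""
    | some m =>
      match PySem.List.index? acc.2 m with
      | none => ""
      | some k => PySem.List.pyGetD acc.1 (k : Int) ""

-- ===== PORT B =====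
-- literal port of B: one fold over zip, keeping the best (id, time) pair; strict < keeps the earliest minimum.
def winner_of_race_alt (runner_id : List String) (time_taken : List Int) : String :=
  match (runner_id.zip time_taken).foldl
      (fun (best : Option (String × Int)) (p : String × Int) =>
        if 0 < p.2 then
          match best with
          | none => some p
          | some q => if p.2 < q.2 then some p else some q
        else best) none with
  | none => ""
  | some b => b.1

-- ===== PRECONDITION & SPEC =====
-- Pre_ excludes exactly the inputs where A raises IndexError: a positive time at an index beyond runner_id's length.
def Pre_winner_of_race (runner_id : List String) (time_taken : List Int) : Prop :=
  ∀ t ∈ time_taken.drop runner_id.length, t ≤ 0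
instance (runner_id : List String) (time_taken : List Int) : Decidable (Pre_winner_of_race runner_id time_taken) := by unfold Pre_winner_of_race; infer_instance
def pvWitness_winner_of_race : List String × List Int := (["a", "b", "c"], [3, 1, 2])

def Spec_winner_of_race (runner_id : List String) (time_taken : List Int) (out : String) : Prop := out = winner_of_race_alt runner_id time_taken
instance (runner_id : List String) (time_taken : List Int) (out : String) : Decidable (Spec_winner_of_race runner_id time_taken out) := by unfold Spec_winner_of_race; infer_instance

-- ===== CLAIM (what is proved, stated in full; the proofs are below) =====
def Claim_equal_winner_of_race : Prop := ∀ (runner_id : List String) (time_taken : List Int), Dom_winner_of_race runner_id time_taken → Pre_winner_of_race runner_id time_taken → Spec_winner_of_race runner_id time_taken (winner_of_race runner_id time_taken)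
-- ===== LEMMAS AND PROOFS =====

-- g picks the pair with the smaller time, keeping the earlier one on ties
def pvG (b p : String × Int) : String × Int := if p.2 < b.2 then p else b

-- B's guarded fold over any list equals the unguarded fold over the positive-time filter
lemma pv_fold_filter (l : List (String × Int)) (b0 : Option (String × Int)) :
    l.foldl (fun (best : Option (String × Int)) (p : String × Int) =>
        if 0 < p.2 then
          match best with
          | none => some p
          | some q => if p.2 < q.2 then some p else some q
        else best) b0
    = (l.filter (fun p => decide (0 < p.2))).foldl (fun best p =>
        match best with
        | none => some p
        | some q => if p.2 < q.2 then some p else some q) b0 := by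
  induction l generalizing b0 with
  | nil => rfl
  | cons p l ih =>
    rw [List.filter_cons]
    by_cases h : 0 < p.2
    · simp only [h, decide_true, List.foldl_cons, if_pos]
      exact ih _
    · simp only [h, decide_false, if_false, List.foldl_cons]
      exact ih _

-- once the accumulator is some b, the unguarded fold is the pvG running minimum
lemma pv_fold_some (l : List (String × Int)) (b : String × Int) :
    l.foldl (fun best p =>
        match best with
        | none => some p
        | some q => if p.2 < q.2 then some p else some q) (some b)
    = some (l.foldl pvG b) := by
  induction l generalizing b with
  | nil => rfl
  | cons p l ih => simp only [List.foldl_cons, pvG]; split <;> exact ih _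

-- the running minimum's time is the foldl min of the times
lemma pv_fold_snd (l : List (String × Int)) (b : String × Int) :
    (l.foldl pvG b).2 = (l.map Prod.snd).foldl min b.2 := by
  induction l generalizing b with
  | nil => rfl
  | cons p l ih =>
    simp only [List.foldl_cons, List.map_cons, ih]
    have h2 : (pvG b p).2 = min b.2 p.2 := by
      simp only [pvG, apply_ite Prod.snd, min_def]
      split_ifs <;> omega
    rw [h2]

-- foldl min is at most its seed
lemma pv_foldl_min_le (l : List Int) (b : Int) : l.foldl min b ≤ b := by
  induction l generalizing b with
  | nil => simp
  | cons x l ih => exact le_trans (ih _) (min_le_left _ _)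

-- the running minimum is the FIRST pair achieving it: everything before it is strictly larger
lemma pv_fold_first (l : List (String × Int)) (b : String × Int) :
    ∃ pre suf, b :: l = pre ++ (l.foldl pvG b) :: suf ∧
      ∀ q ∈ pre, (l.foldl pvG b).2 < q.2 := by
  induction l generalizing b with
  | nil => exact ⟨[], [], rfl, by simp⟩
  | cons p l ih =>
    rw [List.foldl_cons]
    obtain ⟨pre, suf, he, hlt⟩ := ih (pvG b p)
    have hsnd : (l.foldl pvG (pvG b p)).2 ≤ (pvG b p).2 := by
      rw [pv_fold_snd]; exact pv_foldl_min_le _ _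
    by_cases h : p.2 < b.2
    · have hc : pvG b p = p := by simp [pvG, h]
      rw [hc] at he hlt hsnd ⊢
      refine ⟨b :: pre, suf, ?_, ?_⟩
      · rw [List.cons_append, ← he]
      · intro q hq
        rcases List.mem_cons.1 hq with rfl | hq
        · omega
        · exact hlt q hq
    · have hc : pvG b p = b := by simp [pvG, h]
      rw [hc] at he hlt hsnd ⊢
      cases pre with
      | nil =>
        simp only [List.nil_append] at he
        obtain ⟨h1, h2⟩ := List.cons_eq_cons.mp he
        exact ⟨[], p :: l, by rw [← h1]; simp, by simp⟩
      | cons x pre' =>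
        rw [List.cons_append] at he
        obtain ⟨h1, h2⟩ := List.cons_eq_cons.mp he
        have hrb : (l.foldl pvG b).2 < b.2 := h1 ▸ hlt x (List.mem_cons_self ..)
        refine ⟨b :: p :: pre', suf, ?_, ?_⟩
        · rw [List.cons_append, List.cons_append, ← h2]
        · intro q hq
          rcases List.mem_cons.1 hq with rfl | hq
          · exact hrb
          · rcases List.mem_cons.1 hq with rfl | hq
            · omega
            · exact hlt q (List.mem_cons_of_mem _ hq)

-- A's index loop builds exactly the two projections of the positive-time filtered zip
lemma pv_loopA (tt : List Int) (rid : List String) (ids : List String) (times : List Int)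
    (pre : ∀ t ∈ tt.drop rid.length, t ≤ 0) :
    (List.range tt.length).foldl
      (fun (acc : List String × List Int) k =>
        if 0 < tt.getD k 0 then (acc.1 ++ [rid.getD k ""], acc.2 ++ [tt.getD k 0]) else acc)
      (ids, times)
    = (ids ++ ((rid.zip tt).filter (fun p => decide (0 < p.2))).map Prod.fst,
       times ++ ((rid.zip tt).filter (fun p => decide (0 < p.2))).map Prod.snd) := by
  induction tt generalizing rid ids times with
  | nil => simp
  | cons t tt ih =>
    rw [List.length_cons, List.range_succ_eq_map, List.foldl_cons, List.foldl_map]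
    cases rid with
    | nil =>
      have ht : t ≤ 0 := pre t (by simp)
      rw [if_neg (by simpa using by omega : ¬ 0 < (t :: tt).getD 0 0)]
      have hpre : ∀ x ∈ tt.drop ([] : List String).length, x ≤ 0 := by
        intro x hx
        exact pre x (List.mem_cons_of_mem _ (by simpa using hx))
      have := ih ([] : List String) ids times hpre
      simp only [List.getD_cons_succ] at *
      simpa using this
    | cons r rid =>
      have pre' : ∀ x ∈ tt.drop rid.length, x ≤ 0 := by
        intro x hx; exact pre x (by simpa using hx)
      simp only [List.getD_cons_succ, List.getD_cons_zero, List.zip_cons_cons, List.filter_cons]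
      by_cases h : 0 < t
      · rw [if_pos h]
        have := ih rid (ids ++ [r]) (times ++ [t]) pre'
        simp only [h, decide_true, if_pos, List.map_cons] at *
        simpa [List.append_assoc] using this
      · rw [if_neg h]
        have := ih rid ids times pre'
        simp only [h, decide_false] at *
        simpa using this

-- ===== VERDICT (by name: the statement is the Claim_ definition above) =====
theorem winner_of_race_spec : Claim_equal_winner_of_race := by
  intro rid tt _ hpre
  unfold Spec_winner_of_race winner_of_race winner_of_race_alt
  -- A's loop over range(len(time_taken)) becomes the Nat-indexed fold, then pv_loopA
  have hA : (PySem.List.pyRange 0 tt.length 1).foldl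
      (fun (acc : List String × List Int) i =>
        if 0 < PySem.List.pyGetD tt i 0 then
          (acc.1 ++ [PySem.List.pyGetD rid i ""], acc.2 ++ [PySem.List.pyGetD tt i 0])
        else acc) ([], [])
      = (((rid.zip tt).filter (fun p => decide (0 < p.2))).map Prod.fst,
         ((rid.zip tt).filter (fun p => decide (0 < p.2))).map Prod.snd) := by
    rw [PySem.List.pyRange_one, List.foldl_map]
    have hn : ((tt.length : Int) - 0).toNat = tt.length := by omega
    rw [hn]
    have hbody : ∀ (acc : List String × List Int) (k : Nat),
        (if 0 < PySem.List.pyGetD tt (0 + (k : Int)) 0 then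
          (acc.1 ++ [PySem.List.pyGetD rid (0 + (k : Int)) ""],
           acc.2 ++ [PySem.List.pyGetD tt (0 + (k : Int)) 0])
         else acc)
        = (if 0 < tt.getD k 0 then (acc.1 ++ [rid.getD k ""], acc.2 ++ [tt.getD k 0]) else acc) := by
      intro acc k
      simp [PySem.List.pyGetD_natCast]
    simp only [hbody]
    simpa using pv_loopA tt rid [] [] hpre
  rw [hA, pv_fold_filter]
  cases hP : (rid.zip tt).filter (fun p => decide (0 < p.2)) with
  | nil => simp
  | cons p P =>
    rw [if_neg (by simp)]
    rw [List.foldl_cons, pv_fold_some]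
    set r := P.foldl pvG p with hr
    -- min of the times is r.2
    have hmin : PySem.List.min? ((p :: P).map Prod.snd) (fun x => x) = some r.2 := by
      rw [List.map_cons, PySem.List.min?_id_cons, ← pv_fold_snd]
    rw [hmin]
    dsimp only
    -- r is the first pair achieving that minimum
    obtain ⟨pre, suf, he, hlt⟩ := pv_fold_first P p
    rw [← hr] at he hlt
    have hmapsnd : (p :: P).map Prod.snd = pre.map Prod.snd ++ r.2 :: suf.map Prod.snd := by
      rw [he]; simp
    have hnotmem : r.2 ∉ pre.map Prod.snd := by
      intro hm
      obtain ⟨q, hq, hq2⟩ := List.mem_map.1 hm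
      exact absurd hq2 (by have := hlt q hq; omega)
    have hidx : PySem.List.index? ((p :: P).map Prod.snd) r.2 = some pre.length := by
      rw [PySem.List.index?_eq_some_iff]
      exact ⟨pre.map Prod.snd, suf.map Prod.snd, hmapsnd, by simp, hnotmem⟩
    rw [hidx]
    dsimp only
    have hmapfst : (p :: P).map Prod.fst = pre.map Prod.fst ++ r.1 :: suf.map Prod.fst := by
      rw [he]; simp
    rw [PySem.List.pyGetD_natCast, hmapfst]
    rw [List.getD_eq_getElem?_getD, List.getElem?_append_right (by simp)]
    simp
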